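-- pv_equiv track=rewrite | github.com/xmoon2022/blog | scripts/build.py | strip_post_metadata
-- ===== SOURCE A (Python) =====
-- POST_META_SELECTOR = "<post-meta>"
--
-- def strip_post_metadata(source: str) -> str:
--     output: list[str] = []
--     skipping = False
--     for line in source.splitlines():
--         stripped = line.lstrip()
--         if not skipping and stripped.startswith("#metadata("):
--             skipping = True
--             if POST_META_SELECTOR in line:
--                 skipping = False
--             continue
--         if skipping:
--             if POST_META_SELECTOR in line:
--                 skipping = False
--             continue
--         output.append(line)
--     return "\n".join(output).lstrip() + "\n"
-- ===== SOURCE B (Python) =====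
-- POST_META_SELECTOR = "<post-meta>"
--
-- def strip_post_metadata(source: str) -> str:
--     output = []
--     lines = iter(source.splitlines())
--     for line in lines:
--         if line.lstrip().startswith("#metadata("):
--             if POST_META_SELECTOR not in line:
--                 for inner in lines:
--                     if POST_META_SELECTOR in inner:
--                         break
--             continue
--         output.append(line)
--     return "\n".join(output).lstrip() + "\n"
-- ===== Notes on version B (the rewrite author's own statement) =====
-- stated objective: alternative
-- what changed: Replaced the boolean skip-flag state machine with nested iteration over a shared line iterator: a metadata starter triggers an inner loop that consumes the block through its terminator line, so the outer loop carries no flag.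
import Mathlib
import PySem

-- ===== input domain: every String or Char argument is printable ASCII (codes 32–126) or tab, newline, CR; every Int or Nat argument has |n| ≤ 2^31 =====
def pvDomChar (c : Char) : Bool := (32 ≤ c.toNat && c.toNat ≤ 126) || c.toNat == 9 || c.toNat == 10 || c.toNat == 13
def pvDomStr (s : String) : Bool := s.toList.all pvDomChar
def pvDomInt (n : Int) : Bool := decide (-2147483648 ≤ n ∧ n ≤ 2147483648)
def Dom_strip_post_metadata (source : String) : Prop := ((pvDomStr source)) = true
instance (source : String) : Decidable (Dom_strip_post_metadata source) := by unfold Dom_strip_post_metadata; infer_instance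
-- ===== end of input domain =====

-- B restructures A's skip-flag loop into nested consumption of one shared line stream; same result, same cost.

-- ===== PORT A =====
-- one iteration of A's loop: state is (output, skipping)
def pvAStep (st : List String × Bool) (line : String) : List String × Bool :=
  let stripped := PySem.Str.lstrip line
  if !st.2 && PySem.Str.startswith stripped "#metadata(" then
    (st.1, !(PySem.Str.isIn "<post-meta>" line))
  else if st.2 then
    (st.1, !(PySem.Str.isIn "<post-meta>" line))
  else
    (st.1 ++ [line], st.2)

def strip_post_metadata (source : String) : String :=
  let st := (PySem.Str.splitlines source).foldl pvAStep ([], false)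
  PySem.Str.lstrip (PySem.Str.join "\n" st.1) ++ "\n"

-- ===== PORT B =====
-- B's inner 'for inner in lines: break on selector': drop lines through the first one containing the selector
def pvDropBlock : List String → List String
  | [] => []
  | l :: rest => if PySem.Str.isIn "<post-meta>" l then rest else pvDropBlock rest

theorem pvDropBlock_length_le (l : List String) : (pvDropBlock l).length ≤ l.length := by
  induction l with
  | nil => simp [pvDropBlock]
  | cons a rest ih =>
    simp only [pvDropBlock]
    split <;> simp <;> omega

-- B's outer loop over the shared iterator
def pvAltGo : List String → List String
  | [] => []
  | line :: rest =>
    if PySem.Str.startswith (PySem.Str.lstrip line) "#metadata(" then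
      if PySem.Str.isIn "<post-meta>" line then pvAltGo rest
      else pvAltGo (pvDropBlock rest)
    else line :: pvAltGo rest
termination_by l => l.length
decreasing_by
  · simp
  · have := pvDropBlock_length_le rest; simp; omega
  · simp

def strip_post_metadata_alt (source : String) : String :=
  PySem.Str.lstrip (PySem.Str.join "\n" (pvAltGo (PySem.Str.splitlines source))) ++ "\n"

-- ===== PRECONDITION & SPEC =====
def Spec_strip_post_metadata (source : String) (out : String) : Prop := out = strip_post_metadata_alt source
instance (source : String) (out : String) : Decidable (Spec_strip_post_metadata source out) := by unfold Spec_strip_post_metadata; infer_instance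

-- ===== CLAIM (what is proved, stated in full; the proofs are below) =====
def Claim_equal_strip_post_metadata : Prop := ∀ (source : String), Dom_strip_post_metadata source → Spec_strip_post_metadata source (strip_post_metadata source)

-- ===== LEMMAS AND PROOFS =====
-- A's fold with skipping=false produces B's outer-loop output; with skipping=true it produces
-- the output of B after the inner loop consumes the block.
theorem pvFold_eq (lines : List String) : ∀ (out : List String),
    ((lines.foldl pvAStep (out, false)).1 = out ++ pvAltGo lines) ∧
    ((lines.foldl pvAStep (out, true)).1 = out ++ pvAltGo (pvDropBlock lines)) := by
  induction lines with
  | nil => intro out; simp [pvAltGo, pvDropBlock]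
  | cons line rest ih =>
    intro out
    constructor
    · by_cases hs : PySem.Str.startswith (PySem.Str.lstrip line) "#metadata(" = true
      · by_cases hi : PySem.Str.isIn "<post-meta>" line = true
        · simp at hs
          simp at hi
          simp [List.foldl, pvAStep, hs, hi, pvAltGo, (ih out).1]
        · simp at hi
          simp at hs
          simp [List.foldl, pvAStep, hs, hi, pvAltGo, (ih out).2]
      · simp at hs
        simp [List.foldl, pvAStep, hs, pvAltGo, (ih (out ++ [line])).1]
    · by_cases hi : PySem.Str.isIn "<post-meta>" line = true
      · simp at hi
        simp [List.foldl, pvAStep, hi, pvDropBlock, (ih out).1]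
      · simp at hi
        simp [List.foldl, pvAStep, hi, pvDropBlock, (ih out).2]

-- ===== VERDICT (by name: the statement is the Claim_ definition above) =====
theorem strip_post_metadata_spec : Claim_equal_strip_post_metadata := by
  intro source _
  unfold Spec_strip_post_metadata strip_post_metadata strip_post_metadata_alt
  show PySem.Str.lstrip (PySem.Str.join "\n" ((List.foldl pvAStep ([], false) (PySem.Str.splitlines source)).1)) ++ "\n" = _
  rw [(pvFold_eq (PySem.Str.splitlines source) []).1]
  rfl
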